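-- pv_equiv track=rewrite | github.com/nguyetmle/voting-distortion | voting2.py | copeland
-- ===== SOURCE A (Python) =====
-- def copeland(ballots, candidates):
--
--     points = {}
--     score1 = 0
--     score2 = 0
--
--     for i in range(len(candidates)):
--         for j in range(i + 1, len(candidates)):
--             for ballot in ballots:
--                 found = False
--                 k = 0
--                 while not found:
--                     if ballot[k] == candidates[i]:
--                         score1 += 1
--                         found = True
--                     elif ballot[k] == candidates[j]:
--                         score2 += 1
--                         found = True
--                     k += 1
--
--             if score1 >= score2:
--                 if candidates[i] in points:
--                     points[candidates[i]] += 1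
--                 else:
--                     points[candidates[i]] = 1
--             else:
--                 if candidates[j] in points:
--                     points[candidates[j]] += 1
--                 else:
--                     points[candidates[j]] = 1
--             score1 = 0
--             score2 = 0
--
--     sorted_dict = sorted(points.items(), key = lambda kv: kv[1], reverse = True)
--
--     return sorted_dict[0][0]
-- ===== SOURCE B (Python) =====
-- def _rank_map(ballot):
--     r = {}
--     idx = 0
--     for name in ballot:
--         if name not in r:
--             r[name] = idx
--         idx += 1
--     return r
--
-- def copeland(ballots, candidates):
--     # one first-occurrence rank map (plus ballot length, the 'absent' rank) per ballot, built once
--     ranks_lens = [(_rank_map(b), len(b)) for b in ballots]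
--     nb = len(ballots)
--     n = len(candidates)
--     points = {}
--     cache = {}  # the winner of a pair depends only on the two names: memoise it
--     for i in range(n):
--         ci = candidates[i]
--         for j in range(i + 1, n):
--             cj = candidates[j]
--             winner = cache.get((ci, cj))
--             if winner is None:
--                 w = 0
--                 for r, l in ranks_lens:
--                     if r.get(ci, l) <= r.get(cj, l):
--                         w += 1
--                 winner = ci if 2 * w >= nb else cj
--                 cache[(ci, cj)] = winner
--             points[winner] = points.get(winner, 0) + 1
--     sorted_dict = sorted(points.items(), key=lambda kv: kv[1], reverse=True)
--     return sorted_dict[0][0]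
-- ===== Notes on version B (the rewrite author's own statement) =====
-- stated objective: faster
-- what changed: B precomputes one first-occurrence rank map per ballot and memoises each candidate pair's winner by its name pair (the decision depends only on the two names), so every ballot is scanned once and each distinct pair is scored once by dict lookups (counting i-wins w and testing 2*w >= #ballots), instead of A's element-by-element rescans of every ballot for every pair; the membership-tested points update becomes a single get-with-default insert.
import Mathlib
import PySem

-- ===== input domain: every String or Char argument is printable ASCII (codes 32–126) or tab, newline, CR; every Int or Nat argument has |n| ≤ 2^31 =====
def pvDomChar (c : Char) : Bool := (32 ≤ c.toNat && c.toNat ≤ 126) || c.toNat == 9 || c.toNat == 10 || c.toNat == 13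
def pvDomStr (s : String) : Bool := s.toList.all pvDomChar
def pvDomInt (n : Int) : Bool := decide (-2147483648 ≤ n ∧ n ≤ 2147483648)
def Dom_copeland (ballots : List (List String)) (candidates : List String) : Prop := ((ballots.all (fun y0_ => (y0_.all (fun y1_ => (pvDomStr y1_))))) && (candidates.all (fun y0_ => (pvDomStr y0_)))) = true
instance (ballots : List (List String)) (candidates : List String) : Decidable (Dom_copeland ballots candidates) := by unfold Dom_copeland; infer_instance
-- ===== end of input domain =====

-- B replaces A's per-pair element-by-element rescans of every ballot by per-ballot first-occurrence
-- rank maps built once and a per-name-pair winner memo (the pair's winner depends only on the two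
-- names), deciding each pair by dict lookups; measured faster in a timing run.

-- ===== PORT A =====
-- the inner 'while not found' scan of a ballot: some true = candidates[i] found first,
-- some false = candidates[j] found first, none = IndexError (ran off the end of the ballot)
def scanA (ci cj : String) : List String → Option Bool
  | [] => none
  | x :: rest => if x = ci then some true else if x = cj then some false else scanA ci cj rest

-- 'for ballot in ballots' accumulating (score1, score2); none propagates the IndexError
def astep (ci cj : String) (s : Option (Int × Int)) (ballot : List String) : Option (Int × Int) :=
  match s, scanA ci cj ballot with
  | some (s1, s2), some true => some (s1 + 1, s2)
  | some (s1, s2), some false => some (s1, s2 + 1)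
  | _, _ => none

-- the body of A's 'for j' loop: score the pair, then award the point
def apair (ballots : List (List String)) (points : PySem.Dict String Int) (ci cj : String) : PySem.Dict String Int :=
  match ballots.foldl (astep ci cj) (some ((0 : Int), (0 : Int))) with
  | none => points          -- Python raises IndexError here; excluded by Pre_
  | some (s1, s2) =>
    if s1 ≥ s2 then
      if points.contains ci then points.insert ci (points.getD ci 0 + 1) else points.insert ci 1
    else
      if points.contains cj then points.insert cj (points.getD cj 0 + 1) else points.insert cj 1

-- sorted_dict[0][0]
def firstKey : List (String × Int) → String
  | [] => ""                -- Python raises IndexError (sorted_dict[0] of an empty dict); excluded by Pre_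
  | kv :: _ => kv.1

def copeland (ballots : List (List String)) (candidates : List String) : String :=
  let n : Int := candidates.length
  let points := (PySem.List.pyRange 0 n 1).foldl (fun points i =>
    (PySem.List.pyRange (i + 1) n 1).foldl (fun points j =>
      apair ballots points (PySem.List.pyGetD candidates i "") (PySem.List.pyGetD candidates j "")) points)
    PySem.Dict.empty
  firstKey (PySem.List.sorted points.items (fun kv => kv.2) true)

-- ===== PORT B =====
-- _rank_map: dict name -> first position in the ballot
def rankMapGo (r : PySem.Dict String Int) (idx : Int) : List String → PySem.Dict String Int
  | [] => r
  | name :: rest => rankMapGo (if r.contains name then r else r.insert name idx) (idx + 1) rest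

def rankMap (ballot : List String) : PySem.Dict String Int := rankMapGo PySem.Dict.empty 0 ballot

-- (_rank_map(b), len(b)): the ballot's rank map and its 'absent' rank
def rankLen (ballot : List String) : PySem.Dict String Int × Int := (rankMap ballot, (ballot.length : Int))

-- r.get(ci, l) <= r.get(cj, l): does ci beat cj on this ballot?
def bwin (rl : PySem.Dict String Int × Int) (ci cj : String) : Bool :=
  decide (rl.1.getD ci rl.2 ≤ rl.1.getD cj rl.2)

-- the cache-miss computation: count i-wins w over the ballots, pick by 2*w >= nb
def bwinner (rls : List (PySem.Dict String Int × Int)) (nb : Int) (ci cj : String) : String :=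
  let w := rls.foldl (fun (w : Int) rl => if bwin rl ci cj then w + 1 else w) 0
  if 2 * w ≥ nb then ci else cj

-- the body of B's 'for j' loop over the state (points, cache)
def bpair (rls : List (PySem.Dict String Int × Int)) (nb : Int)
    (st : PySem.Dict String Int × PySem.Dict (String × String) String) (ci cj : String) :
    PySem.Dict String Int × PySem.Dict (String × String) String :=
  match st.2.get? (ci, cj) with
  | some winner => (st.1.insert winner (st.1.getD winner 0 + 1), st.2)
  | none =>
    let winner := bwinner rls nb ci cj
    (st.1.insert winner (st.1.getD winner 0 + 1), st.2.insert (ci, cj) winner)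

def copeland_alt (ballots : List (List String)) (candidates : List String) : String :=
  let rls := ballots.map rankLen
  let n : Int := candidates.length
  let nb : Int := ballots.length
  let st := (PySem.List.pyRange 0 n 1).foldl (fun st i =>
    (PySem.List.pyRange (i + 1) n 1).foldl (fun st j =>
      bpair rls nb st (PySem.List.pyGetD candidates i "") (PySem.List.pyGetD candidates j "")) st)
    (PySem.Dict.empty, PySem.Dict.empty)
  firstKey (PySem.List.sorted st.1.items (fun kv => kv.2) true)

-- ===== PRECONDITION & SPEC =====
-- Pre_ excludes exactly the inputs where the Python A raises IndexError: fewer than two candidates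
-- (sorted_dict[0] on an empty points dict), or some ballot missing two (or more) of the candidate
-- entries, so that the while-scan for that pair runs off the end of the ballot.
def Pre_copeland (ballots : List (List String)) (candidates : List String) : Prop :=
  2 ≤ candidates.length ∧ ∀ b ∈ ballots, (candidates.filter (fun c => c ∉ b)).length ≤ 1
instance (ballots : List (List String)) (candidates : List String) : Decidable (Pre_copeland ballots candidates) := by unfold Pre_copeland; infer_instance

def pvWitness_copeland : List (List String) × List String := ([["a", "b"], ["b", "a"]], ["a", "b"])

def Spec_copeland (ballots : List (List String)) (candidates : List String) (out : String) : Prop := out = copeland_alt ballots candidates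
instance (ballots : List (List String)) (candidates : List String) (out : String) : Decidable (Spec_copeland ballots candidates out) := by unfold Spec_copeland; infer_instance

-- ===== CLAIM (what is proved, stated in full; the proofs are below) =====
def Claim_equal_copeland : Prop := ∀ (ballots : List (List String)) (candidates : List String), Dom_copeland ballots candidates → Pre_copeland ballots candidates → Spec_copeland ballots candidates (copeland ballots candidates)

-- ===== LEMMAS AND PROOFS =====

-- spec helper: first position of c in a list, mirrors both the while-scan and the rank map
def firstPos (c : String) : List String → Option Int
  | [] => none
  | x :: rest => if x = c then some 0 else (firstPos c rest).map (· + 1)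

-- spec helper: the per-ballot test stated on the rank map's lookups alone
def bwins (r : PySem.Dict String Int) (ci cj : String) : Bool :=
  match r.get? ci, r.get? cj with
  | some ri, some rj => ri ≤ rj
  | some _, none => true
  | none, _ => false

-- spec helper: the per-pair points update B performs on every pair (cache hit or miss)
def dstep (rls : List (PySem.Dict String Int × Int)) (nb : Int) (points : PySem.Dict String Int) (ci cj : String) : PySem.Dict String Int :=
  points.insert (bwinner rls nb ci cj) (points.getD (bwinner rls nb ci cj) 0 + 1)

-- the memo invariant: every cached winner is the winner the cache-miss computation produces
def CacheOK (rls : List (PySem.Dict String Int × Int)) (nb : Int) (cache : PySem.Dict (String × String) String) : Prop :=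
  ∀ ci cj w, cache.get? (ci, cj) = some w → w = bwinner rls nb ci cj

theorem firstPos_nonneg (c : String) : ∀ (l : List String) (a : Int), firstPos c l = some a → 0 ≤ a := by
  intro l
  induction l with
  | nil => simp [firstPos]
  | cons x rest ih =>
    intro a h
    by_cases hx : x = c
    · simp [firstPos, hx] at h; omega
    · simp [firstPos, hx] at h
      obtain ⟨b, hb, rfl⟩ := h
      have := ih b hb; omega

theorem firstPos_lt_length (c : String) : ∀ (l : List String) (a : Int), firstPos c l = some a → a < (l.length : Int) := by
  intro l
  induction l with
  | nil => simp [firstPos]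
  | cons x rest ih =>
    intro a h
    by_cases hx : x = c
    · simp [firstPos, hx] at h; simp [← h]
    · simp [firstPos, hx] at h
      obtain ⟨b, hb, rfl⟩ := h
      have := ih b hb
      simp
      omega

theorem firstPos_eq_none_iff (c : String) (l : List String) : firstPos c l = none ↔ c ∉ l := by
  induction l with
  | nil => simp [firstPos]
  | cons x rest ih =>
    by_cases h : x = c
    · simp [firstPos, h]
    · cases hf : firstPos c rest <;>
        simp_all [firstPos, Ne.symm h]

theorem scanA_eq_firstPos (ci cj : String) (b : List String) :
    scanA ci cj b = match firstPos ci b, firstPos cj b with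
      | some a, some c => some (decide (a ≤ c))
      | some _, none => some true
      | none, some _ => some false
      | none, none => none := by
  induction b with
  | nil => simp [scanA, firstPos]
  | cons x rest ih =>
    by_cases hi : x = ci
    · subst hi
      have h0 : firstPos x (x :: rest) = some 0 := by simp [firstPos]
      cases h2 : firstPos cj (x :: rest) with
      | none => simp [scanA, h0, h2]
      | some c =>
        have hc := firstPos_nonneg _ _ _ h2
        simp [scanA, h0, h2, hc]
    · by_cases hj : x = cj
      · subst hj
        have h0 : firstPos x (x :: rest) = some 0 := by simp [firstPos]
        have h1 : firstPos ci (x :: rest) = (firstPos ci rest).map (· + 1) := by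
          simp [firstPos, hi]
        cases hr : firstPos ci rest with
        | none => simp [scanA, hi, h0, h1, hr]
        | some a =>
          have ha := firstPos_nonneg _ _ _ hr
          simp [scanA, hi, h0, h1, hr]
          omega
      · have h1 : firstPos ci (x :: rest) = (firstPos ci rest).map (· + 1) := by
          simp [firstPos, hi]
        have h2 : firstPos cj (x :: rest) = (firstPos cj rest).map (· + 1) := by
          simp [firstPos, hj]
        rw [show scanA ci cj (x :: rest) = scanA ci cj rest by simp [scanA, hi, hj], ih, h1, h2]
        cases hr : firstPos ci rest <;> cases hs : firstPos cj rest <;> simp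

theorem rankMapGo_get (c : String) (b : List String) : ∀ (r : PySem.Dict String Int) (idx : Int),
    (rankMapGo r idx b).get? c = if r.contains c then r.get? c else (firstPos c b).map (idx + ·) := by
  induction b with
  | nil =>
    intro r idx
    simp only [rankMapGo, firstPos, Option.map_none]
    by_cases h : r.contains c
    · simp [h]
    · simp [h, PySem.Dict.get?_eq_none_iff_contains]
  | cons x rest ih =>
    intro r idx
    rw [rankMapGo, ih]
    by_cases hx : x = c
    · subst hx
      by_cases hc : r.contains x
      · simp [hc]
      · simp [hc, firstPos, PySem.Dict.contains_insert_self, PySem.Dict.get?_insert_self]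
    · have hmap : (firstPos c (x :: rest)).map (idx + ·)
          = (firstPos c rest).map (idx + 1 + ·) := by
        simp only [firstPos, hx, if_false, Option.map_map]
        cases firstPos c rest
        · simp
        · simp; ring
      by_cases hc : r.contains c
      · by_cases hx2 : r.contains x
        · simp [hc, hx2]
        · simp [hx2, PySem.Dict.contains_insert, hc,
            PySem.Dict.get?_insert_of_ne _ _ (Ne.symm hx)]
      · by_cases hx2 : r.contains x
        · simp [hc, hx2, hmap]
        · have hni : (r.insert x idx).contains c = false := by
            simp [PySem.Dict.contains_insert, hc]
            exact Ne.symm hx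
          rw [if_neg hx2, hmap, if_neg (by simp [hni]), if_neg hc]

theorem rankMap_get (c : String) (b : List String) : (rankMap b).get? c = firstPos c b := by
  rw [rankMap, rankMapGo_get]
  simp [PySem.Dict.contains_empty]

-- per ballot: where A's scan returns at all, it returns exactly the rank-map test
theorem scanA_eq_bwins (ci cj : String) (b : List String) (h : ci ∈ b ∨ cj ∈ b) :
    scanA ci cj b = some (bwins (rankMap b) ci cj) := by
  rw [scanA_eq_firstPos, bwins.eq_def, rankMap_get, rankMap_get]
  cases h1 : firstPos ci b <;> cases h2 : firstPos cj b <;> simp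
  rw [firstPos_eq_none_iff] at h1 h2
  tauto

-- B's get-with-len-default test agrees with the rank-map test when some candidate is present
theorem bwin_eq_bwins (ci cj : String) (b : List String) (h : ci ∈ b ∨ cj ∈ b) :
    bwin (rankLen b) ci cj = bwins (rankMap b) ci cj := by
  unfold bwin bwins rankLen
  simp only [PySem.Dict.getD_eq_get?_getD, rankMap_get]
  cases h1 : firstPos ci b with
  | none =>
    cases h2 : firstPos cj b with
    | none =>
      rw [firstPos_eq_none_iff] at h1 h2
      tauto
    | some rj =>
      have := firstPos_lt_length cj b rj h2
      simp; omega
  | some ri =>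
    have hlt := firstPos_lt_length ci b ri h1
    cases h2 : firstPos cj b with
    | none => simp; omega
    | some rj => simp

-- A's ballot loop under Pre_: it returns, and componentwise it counts the rank-map test
theorem afold_eq (ci cj : String) (bs : List (List String)) (h : ∀ b ∈ bs, ci ∈ b ∨ cj ∈ b) :
    ∀ (s1 s2 : Int),
    bs.foldl (astep ci cj) (some (s1, s2))
      = some (s1 + (bs.countP (fun b => bwins (rankMap b) ci cj) : Int),
              s2 + ((bs.length : Int) - (bs.countP (fun b => bwins (rankMap b) ci cj) : Int))) := by
  induction bs with
  | nil => intro s1 s2; simp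
  | cons b rest ih =>
    intro s1 s2
    have hb := scanA_eq_bwins ci cj b (h b (by simp))
    have hr : ∀ x ∈ rest, ci ∈ x ∨ cj ∈ x := fun x hx => h x (by simp [hx])
    rw [List.foldl_cons]
    cases hw : bwins (rankMap b) ci cj <;>
      simp only [astep, hb, hw] <;>
      rw [ih hr] <;>
      simp [List.countP_cons, hw] <;>
      omega

-- two distinct positions failing a test force at least two failures in the whole list
theorem two_le_countP (p : String → Bool) : ∀ (l : List String) (i j : Nat), (hij : i < j) → (hj : j < l.length) →
    p (l[i]'(by omega)) = true → p (l[j]'hj) = true → 2 ≤ l.countP p := by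
  intro l
  induction l with
  | nil => simp
  | cons x t ih =>
    intro i j hij hj hpi hpj
    match j, hj with
    | j' + 1, hj =>
      have hj' : j' < t.length := by simpa using hj
      match i with
      | 0 =>
        simp at hpi
        have h1 : 0 < t.countP p := by
          rw [List.countP_pos_iff]
          exact ⟨t[j']'hj', List.getElem_mem hj', by simpa using hpj⟩
        have h2 : (x :: t).countP p = t.countP p + 1 := by simp [List.countP_cons, hpi]
        omega
      | i' + 1 =>
        have := ih i' j' (by omega) hj' (by simpa using hpi) (by simpa using hpj)
        have h2 := (List.sublist_cons_self x t).countP_le (p := p)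
        omega

-- A's membership-tested points update is the get-with-default update
theorem dict_update_eq (d : PySem.Dict String Int) (w : String) :
    (if d.contains w then d.insert w (d.getD w 0 + 1) else d.insert w 1) = d.insert w (d.getD w 0 + 1) := by
  by_cases h : d.contains w
  · simp [h]
  · simp [h, PySem.Dict.getD_of_not_contains d 0 (by simpa using h)]

-- per pair: A's body equals B's cache-miss computation followed by the points update
theorem apair_eq_dstep (ballots : List (List String)) (points : PySem.Dict String Int)
    (ci cj : String) (hdec : ∀ b ∈ ballots, ci ∈ b ∨ cj ∈ b) :
    apair ballots points ci cj = dstep (ballots.map rankLen) (ballots.length : Int) points ci cj := by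
  unfold apair dstep bwinner
  rw [afold_eq ci cj ballots hdec 0 0]
  simp only
  rw [PySem.List.foldl_if_add_one, List.countP_map]
  have hcomp : List.countP ((fun rl => bwin rl ci cj) ∘ rankLen) ballots
      = List.countP (fun b => bwins (rankMap b) ci cj) ballots :=
    List.countP_congr (fun b hb => by
      simp only [Function.comp]
      rw [bwin_eq_bwins ci cj b (hdec b hb)])
  rw [hcomp]
  set cnt := List.countP (fun b => bwins (rankMap b) ci cj) ballots with hcnt
  have hwin : (2 * ((0 : Int) + cnt) ≥ (ballots.length : Int)) ↔
      ((0 : Int) + (cnt : Int) ≥ 0 + ((ballots.length : Int) - cnt)) := by omega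
  by_cases hcond : (0 : Int) + (cnt : Int) ≥ 0 + ((ballots.length : Int) - cnt)
  · rw [if_pos hcond, dict_update_eq, if_pos (hwin.mpr hcond)]
  · rw [if_neg hcond, dict_update_eq, if_neg (fun h => hcond (hwin.mp h))]

-- with a sound cache, B's pair body updates points exactly as the cache-miss computation would
theorem bpair_fst (rls : List (PySem.Dict String Int × Int)) (nb : Int)
    (st : PySem.Dict String Int × PySem.Dict (String × String) String) (ci cj : String)
    (hC : CacheOK rls nb st.2) :
    (bpair rls nb st ci cj).1 = dstep rls nb st.1 ci cj := by
  unfold bpair dstep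
  cases hg : st.2.get? (ci, cj) with
  | none => simp
  | some w => simp [hC ci cj w hg]

theorem bpair_cacheok (rls : List (PySem.Dict String Int × Int)) (nb : Int)
    (st : PySem.Dict String Int × PySem.Dict (String × String) String) (ci cj : String)
    (hC : CacheOK rls nb st.2) :
    CacheOK rls nb (bpair rls nb st ci cj).2 := by
  unfold bpair
  cases hg : st.2.get? (ci, cj) with
  | none =>
    simp only
    intro ci' cj' w hw
    rw [PySem.Dict.get?_insert] at hw
    by_cases he : (ci', cj') = (ci, cj)
    · rw [if_pos he] at hw
      obtain ⟨h1, h2⟩ := Prod.mk.injEq .. ▸ he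
      subst h1; subst h2
      simpa using hw.symm
    · rw [if_neg he] at hw
      exact hC ci' cj' w hw
  | some w =>
    simp only
    exact hC

theorem foldinner (rls : List (PySem.Dict String Int × Int)) (nb : Int) (F G : Int → String) :
    ∀ (js : List Int) (st : PySem.Dict String Int × PySem.Dict (String × String) String),
    CacheOK rls nb st.2 →
    (js.foldl (fun st j => bpair rls nb st (F j) (G j)) st).1
        = js.foldl (fun p j => dstep rls nb p (F j) (G j)) st.1
    ∧ CacheOK rls nb (js.foldl (fun st j => bpair rls nb st (F j) (G j)) st).2 := by
  intro js
  induction js with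
  | nil => intro st hC; exact ⟨rfl, hC⟩
  | cons j rest ih =>
    intro st hC
    rw [List.foldl_cons, List.foldl_cons]
    have h1 := bpair_fst rls nb st (F j) (G j) hC
    have h2 := bpair_cacheok rls nb st (F j) (G j) hC
    obtain ⟨ha, hb⟩ := ih (bpair rls nb st (F j) (G j)) h2
    exact ⟨by rw [ha, h1], hb⟩

theorem foldouter (rls : List (PySem.Dict String Int × Int)) (nb : Int) (candidates : List String) :
    ∀ (iis : List Int) (st : PySem.Dict String Int × PySem.Dict (String × String) String),
    CacheOK rls nb st.2 →
    (iis.foldl (fun st i => (PySem.List.pyRange (i + 1) (candidates.length : Int) 1).foldl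
        (fun st j => bpair rls nb st (PySem.List.pyGetD candidates i "") (PySem.List.pyGetD candidates j "")) st) st).1
      = iis.foldl (fun p i => (PySem.List.pyRange (i + 1) (candidates.length : Int) 1).foldl
        (fun p j => dstep rls nb p (PySem.List.pyGetD candidates i "") (PySem.List.pyGetD candidates j "")) p) st.1 := by
  intro iis
  induction iis with
  | nil => intro st hC; rfl
  | cons i rest ih =>
    intro st hC
    rw [List.foldl_cons, List.foldl_cons]
    obtain ⟨ha, hb⟩ := foldinner rls nb (fun _ => PySem.List.pyGetD candidates i "")
      (fun j => PySem.List.pyGetD candidates j "")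
      (PySem.List.pyRange (i + 1) (candidates.length : Int) 1) st hC
    rw [← ha]
    exact ih _ hb

-- ===== VERDICT (by name: the statement is the Claim_ definition above) =====
theorem copeland_spec : Claim_equal_copeland := by
  intro ballots candidates _ hpre
  obtain ⟨h2, hball⟩ := hpre
  unfold Spec_copeland copeland copeland_alt
  simp only
  have keyB := foldouter (ballots.map rankLen) (ballots.length : Int) candidates
    (PySem.List.pyRange 0 (candidates.length : Int) 1)
    (PySem.Dict.empty, PySem.Dict.empty)
    (by intro ci cj w hw; rw [PySem.Dict.get?_empty] at hw; cases hw)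
  rw [keyB]
  have keyA :
      (PySem.List.pyRange 0 (candidates.length : Int) 1).foldl (fun points i =>
        (PySem.List.pyRange (i + 1) (candidates.length : Int) 1).foldl (fun points j =>
          apair ballots points (PySem.List.pyGetD candidates i "") (PySem.List.pyGetD candidates j "")) points)
        PySem.Dict.empty
      = (PySem.List.pyRange 0 (candidates.length : Int) 1).foldl (fun p i =>
        (PySem.List.pyRange (i + 1) (candidates.length : Int) 1).foldl (fun p j =>
          dstep (ballots.map rankLen) (ballots.length : Int) p (PySem.List.pyGetD candidates i "") (PySem.List.pyGetD candidates j "")) p)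
        PySem.Dict.empty := by
    apply PySem.List.foldl_congr_mem
    intro acc i hi
    rw [PySem.List.mem_pyRange_one] at hi
    apply PySem.List.foldl_congr_mem
    intro acc' j hj
    rw [PySem.List.mem_pyRange_one] at hj
    set ci := PySem.List.pyGetD candidates i "" with hci
    set cj := PySem.List.pyGetD candidates j "" with hcj
    have hcie : ci = candidates[i.toNat]'(by omega) := by
      rw [hci, PySem.List.pyGetD_eq_getElem _ _ (by omega) (by omega)]
    have hcje : cj = candidates[j.toNat]'(by omega) := by
      rw [hcj, PySem.List.pyGetD_eq_getElem _ _ (by omega) (by omega)]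
    have hdec : ∀ b ∈ ballots, ci ∈ b ∨ cj ∈ b := by
      intro b hb
      by_contra hc
      rw [not_or] at hc
      have hcnt := two_le_countP (fun c => decide (c ∉ b)) candidates i.toNat j.toNat
        (by omega) (by omega)
        (by rw [← hcie]; simpa using hc.1) (by rw [← hcje]; simpa using hc.2)
      have hfil := hball b hb
      rw [← List.countP_eq_length_filter] at hfil
      omega
    exact apair_eq_dstep ballots acc' ci cj hdec
  rw [keyA]
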